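-- pv_equiv track=rewrite | github.com/AlexandrShpitalnik/ir2_text_relevance | parser.py | get_outer_fields
-- ===== SOURCE A (Python) =====
-- def get_outer_fields(extr):
--     outer_lines = u''
--     newline_flag = True
--     lr_flag = False
--     for w in extr:
--         if (w == u'\n'):
--             if (not lr_flag):
--                 outer_lines += u' '
--             newline_flag = True
--             lr_flag = False
--         elif (w == u' ' and newline_flag) or lr_flag:
--             lr_flag = True
--             newline_flag = False
--         else:
--             newline_flag = False
--             outer_lines += w
--     return outer_lines
-- ===== SOURCE B (Python) =====
-- def get_outer_fields(extr):
--     out = []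
--     line = []
--     for w in extr:
--         if w == '\n':
--             if not (line and line[0] == ' '):
--                 out.append(''.join(line))
--                 out.append(' ')
--             line = []
--         else:
--             line.append(w)
--     if not (line and line[0] == ' '):
--         out.append(''.join(line))
--     return ''.join(out)
-- ===== Notes on version B (the rewrite author's own statement) =====
-- stated objective: simpler
-- what changed: Replaces the per-character newline/leading-space flag machine (building the result by string concatenation) with a line-buffer formulation: characters accumulate into the current line, which is emitted with a separating space at each newline unless it starts with a space, and the trailing segment is emitted without a trailing space; output parts are joined once at the end.
import Mathlib
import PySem

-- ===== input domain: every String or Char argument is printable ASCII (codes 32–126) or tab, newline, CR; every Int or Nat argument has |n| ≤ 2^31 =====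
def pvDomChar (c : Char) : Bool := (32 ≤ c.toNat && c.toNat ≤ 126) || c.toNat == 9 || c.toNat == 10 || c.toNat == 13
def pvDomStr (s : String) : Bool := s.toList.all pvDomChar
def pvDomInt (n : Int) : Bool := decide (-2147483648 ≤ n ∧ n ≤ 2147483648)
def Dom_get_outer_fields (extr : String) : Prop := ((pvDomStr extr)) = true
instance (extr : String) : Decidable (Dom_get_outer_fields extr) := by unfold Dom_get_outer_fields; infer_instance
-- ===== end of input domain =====

-- B replaces A's per-character flag machine by a line-buffer formulation (objective: simpler).


-- ===== PORT A =====
-- state: (outer_lines, newline_flag, lr_flag)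
def pvStepA (s : List Char × Bool × Bool) (w : Char) : List Char × Bool × Bool :=
  if w = '\n' then
    ((if !s.2.2 then s.1 ++ [' '] else s.1), true, false)
  else if (w = ' ' && s.2.1) || s.2.2 then
    (s.1, false, true)
  else
    (s.1 ++ [w], false, false)

def get_outer_fields (extr : String) : String :=
  String.ofList (extr.toList.foldl pvStepA ([], true, false)).1

-- ===== PORT B =====
-- line and line[0] == ' '
def pvStartsSpace (line : List Char) : Bool :=
  match line with
  | c :: _ => c == ' '
  | [] => false

-- state: (out, line)
def pvStepB (s : List Char × List Char) (w : Char) : List Char × List Char :=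
  if w = '\n' then
    ((if !pvStartsSpace s.2 then s.1 ++ s.2 ++ [' '] else s.1), [])
  else
    (s.1, s.2 ++ [w])

def get_outer_fields_alt (extr : String) : String :=
  let st := extr.toList.foldl pvStepB ([], [])
  String.ofList (if !pvStartsSpace st.2 then st.1 ++ st.2 else st.1)

-- ===== PRECONDITION & SPEC =====
def Spec_get_outer_fields (extr : String) (out : String) : Prop := out = get_outer_fields_alt extr
instance (extr : String) (out : String) : Decidable (Spec_get_outer_fields extr out) := by unfold Spec_get_outer_fields; infer_instance

-- ===== CLAIM (what is proved, stated in full; the proofs are below) =====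
def Claim_equal_get_outer_fields : Prop := ∀ (extr : String), Dom_get_outer_fields extr → Spec_get_outer_fields extr (get_outer_fields extr)

-- ===== LEMMAS AND PROOFS =====

-- invariant relating A's state (aout, nf, lr) to B's state (bout, line)
def pvInv (a : List Char × Bool × Bool) (b : List Char × List Char) : Prop :=
  if a.2.2 then
    a.1 = b.1 ∧ a.2.1 = false ∧ pvStartsSpace b.2 = true
  else
    a.1 = b.1 ++ b.2 ∧ a.2.1 = b.2.isEmpty ∧ pvStartsSpace b.2 = false

theorem pvInv_step (a : List Char × Bool × Bool) (b : List Char × List Char)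
    (h : pvInv a b) (w : Char) : pvInv (pvStepA a w) (pvStepB b w) := by
  obtain ⟨aout, nf, lr⟩ := a
  obtain ⟨bout, line⟩ := b
  cases lr <;> rcases line with _ | ⟨c, t⟩ <;> by_cases hw : w = '\n' <;>
      by_cases hws : w = ' ' <;>
    simp_all [pvInv, pvStepA, pvStepB, pvStartsSpace]

theorem pvInv_foldl (l : List Char) (a : List Char × Bool × Bool) (b : List Char × List Char)
    (h : pvInv a b) : pvInv (l.foldl pvStepA a) (l.foldl pvStepB b) := by
  induction l generalizing a b with
  | nil => exact h
  | cons w t ih => exact ih _ _ (pvInv_step a b h w)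

-- ===== VERDICT (by name: the statement is the Claim_ definition above) =====
theorem get_outer_fields_spec : Claim_equal_get_outer_fields := by
  intro extr _
  unfold Spec_get_outer_fields get_outer_fields get_outer_fields_alt
  have h := pvInv_foldl extr.toList ([], true, false) ([], [])
    (by simp [pvInv, pvStartsSpace])
  set a := extr.toList.foldl pvStepA ([], true, false) with ha
  set b := extr.toList.foldl pvStepB ([], []) with hb
  simp only [pvInv] at h
  by_cases hlr : a.2.2 = true
  · rw [if_pos hlr] at h
    simp [h.1, h.2.2]
  · rw [if_neg hlr] at h
    simp [h.1, h.2.2]
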